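-- pv_equiv track=rewrite | github.com/simplyNoOne/AdventOfCode | src/2023/Day7.py | sum_ranks
-- ===== SOURCE A (Python) =====
-- def sum_ranks(rank, cont):
--     sum_b = 0
--     for n1 in cont:
--         if not n1 :
--             continue
--         for n2 in n1:
--             if not n2:
--                 continue
--             for n3 in n2:
--                 if not n3:
--                     continue
--                 for n4 in n3:
--                     if not n4:
--                         continue
--                     for n5 in n4:
--                         if not n5:
--                             continue
--                         sum_b += rank * n5
--                         rank += 1
--     return sum_b, rank
-- ===== SOURCE B (Python) =====
-- def sum_ranks(rank, cont):
--     def walk(node, depth):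
--         if not node:
--             return
--         if depth == 5:
--             yield node
--         else:
--             for child in node:
--                 yield from walk(child, depth + 1)
--     leaves = list(walk(cont, 0))
--     sum_b = sum((rank + i) * v for i, v in enumerate(leaves))
--     return sum_b, rank + len(leaves)
-- ===== Notes on version B (the rewrite author's own statement) =====
-- stated objective: alternative
-- what changed: Replaces the single fused five-deep loop nest that mutates sum and rank in place with a recursive generator that flattens the nesting into a list of nonzero leaves, followed by a separate enumerate pass computing the weighted sum and the final rank from the list length.
import Mathlib
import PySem

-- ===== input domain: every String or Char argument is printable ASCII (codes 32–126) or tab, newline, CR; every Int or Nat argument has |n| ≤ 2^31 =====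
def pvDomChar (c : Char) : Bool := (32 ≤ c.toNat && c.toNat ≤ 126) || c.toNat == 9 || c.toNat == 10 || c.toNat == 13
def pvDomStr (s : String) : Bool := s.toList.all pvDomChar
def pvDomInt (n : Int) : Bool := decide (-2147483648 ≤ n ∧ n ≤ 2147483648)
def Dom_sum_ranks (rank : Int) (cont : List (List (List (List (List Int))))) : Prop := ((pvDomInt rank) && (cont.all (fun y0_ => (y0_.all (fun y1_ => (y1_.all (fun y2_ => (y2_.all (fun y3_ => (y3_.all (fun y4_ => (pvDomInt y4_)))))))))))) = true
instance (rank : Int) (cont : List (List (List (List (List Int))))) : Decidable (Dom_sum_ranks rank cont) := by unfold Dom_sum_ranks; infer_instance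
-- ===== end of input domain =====

-- B replaces A's fused five-deep mutating loop nest by a recursive flatten of the nonzero
-- leaves followed by a separate enumerate/accumulate pass (alternative decomposition, same cost).

-- ===== PORT A =====
-- literal transliteration of A's nested loops; state is (sum_b, rank)
def sum_ranks (rank : Int) (cont : List (List (List (List (List Int))))) : Int × Int :=
  let st :=
    cont.foldl (fun st n1 =>
      if n1 = [] then st else
      n1.foldl (fun st n2 =>
        if n2 = [] then st else
        n2.foldl (fun st n3 =>
          if n3 = [] then st else
          n3.foldl (fun st n4 =>
            if n4 = [] then st else
            n4.foldl (fun st n5 =>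
              if n5 = 0 then st else (st.1 + st.2 * n5, st.2 + 1)) st) st) st) st) (0, rank)
  (st.1, st.2)

-- ===== PORT B =====
-- walk from Source B, one function per depth (falsy check at every level, yield at depth 5)
def walk5 (n : Int) : List Int := if n = 0 then [] else [n]
def walk4 (n : List Int) : List Int := if n = [] then [] else n.flatMap walk5
def walk3 (n : List (List Int)) : List Int := if n = [] then [] else n.flatMap walk4
def walk2 (n : List (List (List Int))) : List Int := if n = [] then [] else n.flatMap walk3
def walk1 (n : List (List (List (List Int)))) : List Int := if n = [] then [] else n.flatMap walk2
def walk0 (n : List (List (List (List (List Int))))) : List Int := if n = [] then [] else n.flatMap walk1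

def sum_ranks_alt (rank : Int) (cont : List (List (List (List (List Int))))) : Int × Int :=
  let leaves := walk0 cont
  let sum_b := (PySem.List.enumerate leaves 0).foldl (fun s iv => s + (rank + iv.1) * iv.2) 0
  (sum_b, rank + leaves.length)

-- ===== PRECONDITION & SPEC =====
def Spec_sum_ranks (rank : Int) (cont : List (List (List (List (List Int))))) (out : Int × Int) : Prop := out = sum_ranks_alt rank cont
instance (rank : Int) (cont : List (List (List (List (List Int))))) (out : Int × Int) : Decidable (Spec_sum_ranks rank cont out) := by unfold Spec_sum_ranks; infer_instance

-- ===== CLAIM (what is proved, stated in full; the proofs are below) =====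
def Claim_equal_sum_ranks : Prop := ∀ (rank : Int) (cont : List (List (List (List (List Int))))), Dom_sum_ranks rank cont → Spec_sum_ranks rank cont (sum_ranks rank cont)

-- ===== LEMMAS AND PROOFS =====

-- A's leaf-level loop body
def stepL (st : Int × Int) (v : Int) : Int × Int := if v = 0 then st else (st.1 + st.2 * v, st.2 + 1)

-- running A's loop body at one level = running stepL over the flattened leaves of that level
theorem foldl_flatMap_step {α : Type} (w : α → List Int) (f : (Int × Int) → α → (Int × Int))
    (h : ∀ st a, f st a = (w a).foldl stepL st) :
    ∀ (l : List α) (st : Int × Int), l.foldl f st = (l.flatMap w).foldl stepL st := by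
  intro l
  induction l with
  | nil => intro st; rfl
  | cons a t ih =>
    intro st
    simp only [List.foldl_cons, List.flatMap_cons, List.foldl_append, h, ih]

theorem foldl_flatMap_step_if {α : Type} (w : α → List Int) (f : (Int × Int) → α → (Int × Int))
    (h : ∀ st a, f st a = (w a).foldl stepL st) (l : List α) (st : Int × Int) :
    (if l = [] then st else l.foldl f st) = ((if l = [] then ([] : List Int) else l.flatMap w)).foldl stepL st := by
  by_cases hl : l = [] <;> simp [hl, foldl_flatMap_step w f h]

theorem step_eq_walk5 (st : Int × Int) (a : Int) :
    stepL st a = (walk5 a).foldl stepL st := by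
  by_cases h : a = 0 <;> simp [walk5, stepL, h]

theorem foldl4 (st : Int × Int) (n : List Int) :
    (if n = [] then st else n.foldl stepL st) = (walk4 n).foldl stepL st := by
  simpa [walk4] using foldl_flatMap_step_if walk5 stepL step_eq_walk5 n st

theorem foldl3 (st : Int × Int) (n : List (List Int)) :
    (if n = [] then st else n.foldl (fun st n4 => if n4 = [] then st else n4.foldl stepL st) st)
      = (walk3 n).foldl stepL st := by
  simpa [walk3] using foldl_flatMap_step_if walk4 _ (fun st a => foldl4 st a) n st

theorem foldl2 (st : Int × Int) (n : List (List (List Int))) :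
    (if n = [] then st else
      n.foldl (fun st n3 => if n3 = [] then st else
        n3.foldl (fun st n4 => if n4 = [] then st else n4.foldl stepL st) st) st)
      = (walk2 n).foldl stepL st := by
  simpa [walk2] using foldl_flatMap_step_if walk3 _ (fun st a => foldl3 st a) n st

theorem foldl1 (st : Int × Int) (n : List (List (List (List Int)))) :
    (if n = [] then st else
      n.foldl (fun st n2 => if n2 = [] then st else
        n2.foldl (fun st n3 => if n3 = [] then st else
          n3.foldl (fun st n4 => if n4 = [] then st else n4.foldl stepL st) st) st) st)
      = (walk1 n).foldl stepL st := by
  simpa [walk1] using foldl_flatMap_step_if walk2 _ (fun st a => foldl2 st a) n st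

theorem foldl0 (st : Int × Int) (n : List (List (List (List (List Int))))) :
    n.foldl (fun st n1 => if n1 = [] then st else
      n1.foldl (fun st n2 => if n2 = [] then st else
        n2.foldl (fun st n3 => if n3 = [] then st else
          n3.foldl (fun st n4 => if n4 = [] then st else n4.foldl stepL st) st) st) st) st
      = (walk0 n).foldl stepL st := by
  have h := foldl_flatMap_step walk1 _ (fun st a => foldl1 st a) n st
  by_cases hn : n = [] <;> simp [walk0, hn] at h ⊢ <;> exact h

-- leaves produced by walk are never zero
theorem walk0_ne_zero : ∀ v ∈ walk0 n, v ≠ 0 := by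
  intro v hv
  unfold walk0 at hv; split at hv
  · simp at hv
  · simp only [List.mem_flatMap] at hv
    obtain ⟨a1, _, hv⟩ := hv
    unfold walk1 at hv; split at hv
    · simp at hv
    · simp only [List.mem_flatMap] at hv
      obtain ⟨a2, _, hv⟩ := hv
      unfold walk2 at hv; split at hv
      · simp at hv
      · simp only [List.mem_flatMap] at hv
        obtain ⟨a3, _, hv⟩ := hv
        unfold walk3 at hv; split at hv
        · simp at hv
        · simp only [List.mem_flatMap] at hv
          obtain ⟨a4, _, hv⟩ := hv
          unfold walk4 at hv; split at hv
          · simp at hv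
          · simp only [List.mem_flatMap] at hv
            obtain ⟨a5, _, hv⟩ := hv
            unfold walk5 at hv; split at hv
            · simp at hv
            · simp at hv; omega

-- weighted sum with ranks starting at r
def esum (r : Int) : List Int → Int
  | [] => 0
  | v :: t => r * v + esum (r + 1) t

theorem foldl_stepL_nonzero :
    ∀ (L : List Int), (∀ v ∈ L, v ≠ 0) → ∀ (s r : Int),
      L.foldl stepL (s, r) = (s + esum r L, r + L.length) := by
  intro L
  induction L with
  | nil => intro _ s r; simp [esum]
  | cons v t ih =>
    intro hnz s r
    have hv : v ≠ 0 := hnz v (by simp)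
    rw [List.foldl_cons, show stepL (s, r) v = (s + r * v, r + 1) by simp [stepL, hv],
      ih (fun w hw => hnz w (by simp [hw]))]
    refine Prod.ext ?_ ?_ <;> simp [esum] <;> push_cast <;> ring_nf

theorem enumerate_foldl (rank : Int) :
    ∀ (L : List Int) (k acc : Int),
      (PySem.List.enumerate L k).foldl (fun s iv => s + (rank + iv.1) * iv.2) acc
        = acc + esum (rank + k) L := by
  intro L
  induction L with
  | nil => intro k acc; simp [PySem.List.enumerate_nil, esum]
  | cons v t ih =>
    intro k acc
    rw [PySem.List.enumerate_cons, List.foldl_cons, ih, esum]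
    ring

-- ===== VERDICT (by name: the statement is the Claim_ definition above) =====
theorem sum_ranks_spec : Claim_equal_sum_ranks := by
  intro rank cont _
  unfold Spec_sum_ranks
  simp only [sum_ranks, sum_ranks_alt]
  rw [show (fun (st : Int × Int) (n5 : Int) => if n5 = 0 then st else (st.1 + st.2 * n5, st.2 + 1)) = stepL from rfl,
    foldl0, foldl_stepL_nonzero (walk0 cont) walk0_ne_zero 0 rank,
    enumerate_foldl rank (walk0 cont) 0 0]
  simp
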